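-- pv_equiv track=rewrite | github.com/daviddoret/punctilious | sandbox/test5.py | increment_lexicographic_rank
-- ===== SOURCE A (Python) =====
-- from typing import Tuple
--
-- def increment_lexicographic_rank(s: Tuple[int, ...]) -> Tuple[int, ...]:
--     """
--     Return the next tuple in reverse-lexicographic order within the class of
--     nonnegative integer tuples of the same length and the same adjusted sum
--     (adjusted sum = sum(s) + len(s)). The first tuple in this order is
--     (N, 0, 0, ..., 0) and the last is (0, 0, ..., 0, N), where N = sum(s).
--
--     Raises ValueError if s is already the last tuple in this class.
--     """
--     if not isinstance(s, tuple) or not s: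
--         raise ValueError("Input must be a non-empty tuple of nonnegative integers.")
--     if any((not isinstance(x, int)) or x < 0 for x in s):
--         raise ValueError("All elements must be integers >= 0.")
--
--     n = len(s)
--     # Find the rightmost index i (but not the last position) with s[i] > 0.
--     # If none exists, we are at the last tuple (..., 0, 0, N).
--     for i in range(n - 2, -1, -1):
--         if s[i] > 0:
--             # Move one unit from position i to position i+1,
--             # and pack the entire tail sum to i+1 to keep the result as large
--             # as possible under the new prefix (i.e., immediate next in reverse-lex order).
--             tail_sum = 1 + sum(s[i + 1:])  # the 1 we moved plus existing tail
--             out = list(s)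
--             out[i] -= 1
--             out[i + 1] = tail_sum
--             for j in range(i + 2, n):
--                 out[j] = 0
--             return tuple(out)
--
--     # If we didn’t find such an i, we’re at the end of the class.
--     raise ValueError("End of class reached.")
-- ===== SOURCE B (Python) =====
-- def increment_lexicographic_rank(s):
--     if not isinstance(s, tuple) or not s:
--         raise ValueError("Input must be a non-empty tuple of nonnegative integers.")
--     if any((not isinstance(x, int)) or x < 0 for x in s):
--         raise ValueError("All elements must be integers >= 0.")
--     n = len(s)
--     # One LEFT-TO-RIGHT pass recording the last positive index before the final
--     # position and the prefix sum up to it; the tail sum is then recovered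
--     # arithmetically from the total, so no backward scan or tail slice is needed.
--     last = None          # last j < n-1 with s[j] > 0
--     pref_at_last = 0     # sum(s[:last])
--     prefix = 0
--     for j in range(n - 1):
--         if s[j] > 0:
--             last = j
--             pref_at_last = prefix
--         prefix += s[j]
--     if last is None:
--         raise ValueError("End of class reached.")
--     total = prefix + s[n - 1]
--     # sum(s[last+1:]) = total - pref_at_last - s[last]
--     return s[:last] + (s[last] - 1, total - pref_at_last - s[last] + 1) + (0,) * (n - last - 2)
-- ===== Notes on version B (the rewrite author's own statement) =====
-- stated objective: alternative
-- what changed: A scans right-to-left for the rightmost positive entry and then sums the tail slice and mutates a copy; B makes one left-to-right pass recording the last positive index and prefix sums, recovers the tail sum arithmetically from the total, and assembles the result by concatenation.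
import Mathlib
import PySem

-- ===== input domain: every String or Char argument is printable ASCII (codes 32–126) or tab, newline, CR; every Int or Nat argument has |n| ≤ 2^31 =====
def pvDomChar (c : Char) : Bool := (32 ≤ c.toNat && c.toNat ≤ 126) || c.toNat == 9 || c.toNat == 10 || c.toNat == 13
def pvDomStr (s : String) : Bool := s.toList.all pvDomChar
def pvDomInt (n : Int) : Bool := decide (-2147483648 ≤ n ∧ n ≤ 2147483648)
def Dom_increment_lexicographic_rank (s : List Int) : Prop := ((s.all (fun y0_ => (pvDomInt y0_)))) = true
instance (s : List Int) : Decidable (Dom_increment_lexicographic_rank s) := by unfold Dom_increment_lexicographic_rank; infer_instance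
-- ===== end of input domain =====

-- B replaces A's right-to-left search + tail-slice sum + copy mutation by one forward pass
-- (last positive index, prefix sums) and an arithmetic tail sum; equal cost, different traversal.

-- ===== PORT A =====
-- body of A's loop when s[i] > 0: tail_sum from a slice-sum, then mutate a copy of s
def pvBuildA (s : List Int) (i : Nat) : List Int :=
  let n : Int := s.length
  let tail_sum : Int := 1 + (PySem.List.slice s (some ((i : Int) + 1)) none).sum
  let out := s.set i (s.getD i 0 - 1)
  let out := out.set (i + 1) tail_sum
  (PySem.List.pyRange ((i : Int) + 2) n 1).foldl (fun o j => o.set j.toNat 0) out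

-- for i in range(n-2, -1, -1): counts i down from the given start index to 0
def pvFindA (s : List Int) : Nat → Option (List Int)
  | 0 => if 0 < s.getD 0 0 then some (pvBuildA s 0) else none
  | i + 1 => if 0 < s.getD (i + 1) 0 then some (pvBuildA s (i + 1)) else pvFindA s i

def increment_lexicographic_rank (s : List Int) : List Int :=
  if s = [] then []                              -- ValueError (excluded by Pre_)
  else if s.any (fun x => x < 0) then []         -- ValueError (excluded by Pre_)
  else match s.length with
    | 0 => []
    | 1 => []                                    -- empty range ⇒ ValueError (excluded by Pre_)
    | n + 2 => (pvFindA s n).getD []             -- none ⇒ ValueError (excluded by Pre_)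

-- ===== PORT B =====
-- forward pass: state = (last positive index before n-1, prefix sum at it, running prefix sum)
def pvScanB (s : List Int) : Option Nat × Int × Int :=
  (PySem.List.pyRange 0 ((s.length : Int) - 1) 1).foldl
    (fun st j =>
      if 0 < s.getD j.toNat 0 then (some j.toNat, st.2.2, st.2.2 + s.getD j.toNat 0)
      else (st.1, st.2.1, st.2.2 + s.getD j.toNat 0)) (none, 0, 0)

def increment_lexicographic_rank_alt (s : List Int) : List Int :=
  if s = [] then []
  else if s.any (fun x => x < 0) then []
  else
    match pvScanB s with
    | (none, _, _) => []                         -- ValueError (excluded by Pre_)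
    | (some last, pai, pref) =>
        let total := pref + s.getD (s.length - 1) 0
        s.take last ++ [s.getD last 0 - 1, total - pai - s.getD last 0 + 1]
          ++ List.replicate (s.length - last - 2) 0

-- ===== PRECONDITION & SPEC =====
-- Pre_ excludes exactly the inputs where A raises ValueError: the empty tuple, a negative
-- element, or no positive element before the last position ("End of class reached").
def Pre_increment_lexicographic_rank (s : List Int) : Prop :=
  s ≠ [] ∧ (∀ x ∈ s, 0 ≤ x) ∧ ∃ x ∈ s.take (s.length - 1), 0 < x
instance (s : List Int) : Decidable (Pre_increment_lexicographic_rank s) := by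
  unfold Pre_increment_lexicographic_rank; infer_instance

def pvWitness_increment_lexicographic_rank : List Int := [1, 0]

def Spec_increment_lexicographic_rank (s : List Int) (out : List Int) : Prop := out = increment_lexicographic_rank_alt s
instance (s : List Int) (out : List Int) : Decidable (Spec_increment_lexicographic_rank s out) := by unfold Spec_increment_lexicographic_rank; infer_instance

-- ===== CLAIM (what is proved, stated in full; the proofs are below) =====
def Claim_equal_increment_lexicographic_rank : Prop := ∀ (s : List Int), Dom_increment_lexicographic_rank s → Pre_increment_lexicographic_rank s → Spec_increment_lexicographic_rank s (increment_lexicographic_rank s)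

-- ===== LEMMAS AND PROOFS =====

-- zero-filling positions a, a+1, ..., length-1 of o = keep the first a entries, zeros after
theorem pvFoldZero (k : Nat) : ∀ (o : List Int) (a : Nat), o.length = a + k →
    (PySem.List.pyRange (a : Int) (o.length : Int) 1).foldl (fun o j => o.set j.toNat 0) o
      = o.take a ++ List.replicate k 0 := by
  induction k with
  | zero =>
    intro o a h
    rw [PySem.List.pyRange_one_eq_nil (by omega), List.take_of_length_le (by omega)]
    simp
  | succ k ih =>
    intro o a h
    rw [PySem.List.pyRange_one_cons (by exact_mod_cast (by omega : a < o.length))]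
    simp only [List.foldl_cons, Int.toNat_natCast]
    have hthis := ih (o.set a 0) (a + 1) (by simp; omega)
    simp only [List.length_set] at hthis
    push_cast at hthis
    rw [hthis]
    apply List.ext_getElem
    · simp; omega
    · intro j h1 h2
      simp only [List.getElem_append, List.length_take, List.getElem_take,
        List.getElem_set, List.getElem_replicate, List.length_set]
      split_ifs <;> simp_all <;> omega

-- two List.set updates inside a take, as a concatenation
theorem pvTakeSetSet (s : List Int) (i : Nat) (a t : Int) (h : i + 1 < s.length) :
    ((s.set i a).set (i + 1) t).take (i + 2) = s.take i ++ [a, t] := by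
  have hmin : min i s.length = i := by omega
  apply List.ext_getElem
  · simp; omega
  · intro j h1 h2
    simp only [List.length_take, List.length_set] at h1 h2
    rw [List.getElem_take, List.getElem_set, List.getElem_set, List.getElem_append]
    simp only [List.length_take, hmin]
    rcases (by omega : j < i ∨ j = i ∨ j = i + 1) with hj | hj | hj
    · rw [if_neg (by omega), if_neg (by omega), dif_pos (by omega), List.getElem_take]
    · subst hj
      rw [if_neg (by omega), if_pos rfl, dif_neg (by omega)]
      simp
    · subst hj
      rw [if_pos rfl, dif_neg (by omega)]
      have h1i : i + 1 - i = 1 := by omega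
      simp [h1i]

-- A's mutate-a-copy build, written as a concatenation
theorem pvBuild_eq (s : List Int) (i : Nat) (h : i + 2 ≤ s.length) :
    pvBuildA s i = s.take i ++ [s.getD i 0 - 1, 1 + (s.drop (i + 1)).sum]
      ++ List.replicate (s.length - i - 2) 0 := by
  unfold pvBuildA
  rw [show ((i : Int) + 1) = ((i + 1 : Nat) : Int) by push_cast; ring,
    PySem.List.slice_from_natCast]
  have hlen : ((s.set i (s.getD i 0 - 1)).set (i + 1)
      (1 + (s.drop (i + 1)).sum)).length = (i + 2) + (s.length - i - 2) := by simp; omega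
  have hz := pvFoldZero (s.length - i - 2) ((s.set i (s.getD i 0 - 1)).set (i + 1)
      (1 + (s.drop (i + 1)).sum)) (i + 2) hlen
  simp only [List.length_set] at hz
  push_cast at hz
  rw [hz, pvTakeSetSet s i _ _ (by omega)]

-- last index j ≤ m with s[j] > 0 (the index A's countdown loop stops at)
def pvLast (s : List Int) : Nat → Option Nat
  | 0 => if 0 < s.getD 0 0 then some 0 else none
  | i + 1 => if 0 < s.getD (i + 1) 0 then some (i + 1) else pvLast s i

theorem pvFindA_eq_map (s : List Int) : ∀ i, pvFindA s i = (pvLast s i).map (pvBuildA s) := by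
  intro i
  induction i with
  | zero => simp only [pvFindA, pvLast]; split_ifs <;> rfl
  | succ i ih => simp only [pvFindA, pvLast]; split_ifs <;> simp [ih]

-- B's forward fold after m steps, as structural recursion on m
def pvState (s : List Int) : Nat → Option Nat × Int × Int
  | 0 => (none, 0, 0)
  | m + 1 =>
      let st := pvState s m
      if 0 < s.getD m 0 then (some m, st.2.2, st.2.2 + s.getD m 0)
      else (st.1, st.2.1, st.2.2 + s.getD m 0)

theorem pvScan_eq_state (s : List Int) : ∀ m : Nat,
    (PySem.List.pyRange 0 (m : Int) 1).foldl
      (fun st j =>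
        if 0 < s.getD j.toNat 0 then (some j.toNat, st.2.2, st.2.2 + s.getD j.toNat 0)
        else (st.1, st.2.1, st.2.2 + s.getD j.toNat 0)) (none, 0, 0) = pvState s m := by
  intro m
  induction m with
  | zero => rw [PySem.List.pyRange_one_eq_nil (by omega)]; rfl
  | succ m ih =>
    rw [show ((m + 1 : Nat) : Int) = (m : Int) + 1 by push_cast; ring,
      PySem.List.pyRange_one_succ_right (by omega), List.foldl_append, ih]
    simp only [List.foldl_cons, List.foldl_nil, Int.toNat_natCast]
    rfl

theorem pvTakeSumStep (s : List Int) (m : Nat) :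
    (s.take (m + 1)).sum = (s.take m).sum + s.getD m 0 := by
  rw [List.take_add_one, List.sum_append, List.getD_eq_getElem?_getD]
  cases h : s[m]? <;> simp

theorem pvState_sum (s : List Int) : ∀ m, (pvState s m).2.2 = (s.take m).sum := by
  intro m
  induction m with
  | zero => simp [pvState]
  | succ m ih =>
    simp only [pvState, pvTakeSumStep]
    split_ifs <;> simp [ih]

theorem pvState_fst (s : List Int) : ∀ m, (pvState s (m + 1)).1 = pvLast s m := by
  intro m
  induction m with
  | zero => simp only [pvState, pvLast]; split_ifs <;> rfl
  | succ m ih =>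
    simp only [pvState, pvLast] at ih ⊢
    split_ifs
    all_goals first
      | rfl
      | (rw [if_pos ‹0 < s.getD m 0›] at ih; exact ih)
      | (rw [if_neg ‹¬0 < s.getD m 0›] at ih; exact ih)

theorem pvState_pai (s : List Int) : ∀ m i, (pvState s m).1 = some i →
    (pvState s m).2.1 = (s.take i).sum ∧ i < m ∧ 0 < s.getD i 0 := by
  intro m
  induction m with
  | zero => intro i h; simp [pvState] at h
  | succ m ih =>
    intro i h
    simp only [pvState] at h ⊢
    split_ifs at h ⊢ with hp
    · obtain rfl : m = i := by simpa using h
      exact ⟨pvState_sum s m, by omega, hp⟩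
    · obtain ⟨h1, h2, h3⟩ := ih i h
      exact ⟨h1, by omega, h3⟩

-- sum split at index i: s.sum = sum(s[:i]) + s[i] + sum(s[i+1:])
theorem pvSumSplit (s : List Int) (i : Nat) (h : i < s.length) :
    s.sum = (s.take i).sum + s.getD i 0 + (s.drop (i + 1)).sum := by
  conv_lhs => rw [← List.take_append_drop i s]
  rw [List.sum_append, List.drop_eq_getElem_cons h, List.sum_cons,
    List.getD_eq_getElem s 0 h]
  ring

-- ===== VERDICT (by name: the statement is the Claim_ definition above) =====
theorem increment_lexicographic_rank_spec : Claim_equal_increment_lexicographic_rank := by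
  intro s _ hPre
  obtain ⟨hne, hnonneg, x, hxmem, hxpos⟩ := hPre
  have hlen2 : 2 ≤ s.length := by
    by_contra hc
    have h1 : s.length - 1 = 0 := by omega
    rw [h1] at hxmem
    simp at hxmem
  have hany : s.any (fun x => decide (x < 0)) = false := by
    simp only [List.any_eq_false]
    intro a ha
    simpa using hnonneg a ha
  unfold Spec_increment_lexicographic_rank increment_lexicographic_rank increment_lexicographic_rank_alt
  rw [if_neg hne, if_neg hne]
  simp only [hany, if_false, Bool.false_eq_true]
  obtain ⟨n, hn⟩ : ∃ n, s.length = n + 2 := ⟨s.length - 2, by omega⟩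
  have hscan : pvScanB s = pvState s (n + 1) := by
    unfold pvScanB
    rw [hn, show ((n + 2 : Nat) : Int) - 1 = ((n + 1 : Nat) : Int) by push_cast; ring]
    exact pvScan_eq_state s (n + 1)
  rw [hn, hscan]
  show (pvFindA s n).getD [] = _
  rw [pvFindA_eq_map s n]
  have hfst := pvState_fst s n
  cases hL : pvLast s n with
  | none =>
    have : pvState s (n + 1) = (none, (pvState s (n+1)).2.1, (pvState s (n+1)).2.2) := by
      rw [← hL, ← hfst]
    rw [this]
    rfl
  | some i =>
    have hst : (pvState s (n + 1)).1 = some i := by rw [hfst, hL]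
    obtain ⟨hpai, hilt, hip⟩ := pvState_pai s (n + 1) i hst
    have : pvState s (n + 1) = (some i, (pvState s (n+1)).2.1, (pvState s (n+1)).2.2) := by
      rw [← hst]
    rw [this]
    simp only [Option.map_some, Option.getD_some]
    rw [pvBuild_eq s i (by omega), hpai, pvState_sum s (n + 1)]
    have htot : (s.take (n + 1)).sum + s.getD (s.length - 1) 0 = s.sum := by
      rw [hn]
      have : n + 2 - 1 = n + 1 := by omega
      rw [this, ← pvTakeSumStep s (n + 1), List.take_of_length_le (by omega)]
    rw [hn] at htot ⊢
    have hsplit := pvSumSplit s i (by omega)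
    have hval : (s.take (n+1)).sum + s.getD (n + 2 - 1) 0 - (s.take i).sum - s.getD i 0 + 1
        = 1 + (s.drop (i + 1)).sum := by
      have h2 : n + 2 - 1 = n + 2 - 1 := rfl
      omega
    rw [hval]
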